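-- pv_equiv track=rewrite | github.com/UKoksal/FYP_FunctionalDecouplings | top.py | is_Lipschitz
-- ===== SOURCE A (Python) =====
-- import itertools
--
-- def to_decimal(lst):
--     sum = 0
--     idx = len(lst)-1
--     for i in lst:
--         sum += i * 2**idx
--         idx-=1
--     return sum
--
-- def is_Lipschitz(inputs, results, k):
--     inp_idx = list(range(len(inputs)))
--     inp_combs = list(itertools.combinations(inp_idx, 2))
--     for comb in inp_combs:
--         sum = abs(to_decimal(results[comb[0]]) - to_decimal(results[comb[1]]))
--         suminp = abs(to_decimal(inputs[comb[0]]) - to_decimal(inputs[comb[1]]))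
--         if sum > k*suminp:
--             return False
--     return True
-- ===== SOURCE B (Python) =====
-- def _dec(bits):
--     v = 0
--     for b in bits:
--         v = 2 * v + b
--     return v
--
-- def is_Lipschitz(inputs, results, k):
--     pts = sorted(((_dec(x), _dec(r)) for x, r in zip(inputs, results)), key=lambda p: p[0])
--     return all(abs(q[1] - p[1]) <= k * abs(q[0] - p[0]) for p, q in zip(pts, pts[1:]))
-- ===== Notes on version B (the rewrite author's own statement) =====
-- stated objective: faster
-- what changed: Replaces the all-pairs combinations scan (recomputing each list's decimal value for every pair) with one Horner-rule decimal pass, a sort by input value, and an adjacent-pairs-only check, exact by telescoping the Lipschitz inequality along the sorted order.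
import Mathlib
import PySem

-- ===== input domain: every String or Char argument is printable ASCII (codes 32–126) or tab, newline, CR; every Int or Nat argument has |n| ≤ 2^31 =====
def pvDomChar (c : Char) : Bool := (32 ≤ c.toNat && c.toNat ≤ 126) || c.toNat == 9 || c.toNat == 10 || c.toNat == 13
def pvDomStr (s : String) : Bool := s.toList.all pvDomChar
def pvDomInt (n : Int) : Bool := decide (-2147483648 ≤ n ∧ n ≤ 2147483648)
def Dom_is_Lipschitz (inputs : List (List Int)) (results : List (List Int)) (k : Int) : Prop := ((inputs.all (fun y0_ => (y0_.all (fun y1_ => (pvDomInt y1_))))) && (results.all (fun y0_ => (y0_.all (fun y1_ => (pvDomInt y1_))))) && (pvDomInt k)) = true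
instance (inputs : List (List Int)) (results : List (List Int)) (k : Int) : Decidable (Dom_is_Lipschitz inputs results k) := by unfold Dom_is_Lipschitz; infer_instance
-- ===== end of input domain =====

-- B replaces A's all-pairs combinations scan by one Horner-rule decimal pass, a sort by
-- input value, and an adjacent-pairs-only check (exact by telescoping the inequality).

-- ===== PORT A =====
-- Python's idx is an int counting down from len(lst)-1; it is only used as an exponent
-- while ≥ 0 (it reaches -1 only after the last iteration), so a Nat countdown is exact.
def to_decimal (lst : List Int) : Int :=
  (lst.foldl (fun (p : Int × Nat) i => (p.1 + i * 2 ^ p.2, p.2 - 1)) (0, lst.length - 1)).1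

-- itertools.combinations(l, 2), in itertools order
def combs2 : List Int → List (Int × Int)
  | [] => []
  | a :: t => t.map (fun b => (a, b)) ++ combs2 t

-- the for-loop over inp_combs with its early return False; out-of-range indexing
-- (Python IndexError) is totalised with default [] and excluded by Pre_is_Lipschitz
def lipLoop (inputs : List (List Int)) (results : List (List Int)) (k : Int) :
    List (Int × Int) → Bool
  | [] => true
  | (i, j) :: rest =>
      let s := |to_decimal (PySem.List.pyGetD results i []) - to_decimal (PySem.List.pyGetD results j [])|
      let suminp := |to_decimal (PySem.List.pyGetD inputs i []) - to_decimal (PySem.List.pyGetD inputs j [])|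
      if s > k * suminp then false else lipLoop inputs results k rest

def is_Lipschitz (inputs : List (List Int)) (results : List (List Int)) (k : Int) : Bool :=
  let inp_idx := PySem.List.pyRange 0 (inputs.length : Int) 1
  let inp_combs := combs2 inp_idx
  lipLoop inputs results k inp_combs

-- ===== PORT B =====
-- _dec: Horner's rule, v = 2*v + b over the bits
def hornerDec (bits : List Int) : Int := bits.foldl (fun v b => 2 * v + b) 0

-- pts[1:] is List.drop 1 (exact: slice with nonnegative start 1)
def is_Lipschitz_alt (inputs : List (List Int)) (results : List (List Int)) (k : Int) : Bool :=
  let pts := PySem.List.sorted ((inputs.zip results).map (fun p => (hornerDec p.1, hornerDec p.2)))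
      (fun p => p.1) false
  (pts.zip (pts.drop 1)).all (fun pq => decide (|pq.2.2 - pq.1.2| ≤ k * |pq.2.1 - pq.1.1|))

-- ===== PRECONDITION & SPEC =====
-- A raises IndexError (results[j]) exactly when it has a pair to check (len(inputs) ≥ 2)
-- but results is shorter than inputs; Pre_ admits every input on which A returns.
def Pre_is_Lipschitz (inputs : List (List Int)) (results : List (List Int)) (k : Int) : Prop :=
  inputs.length ≤ results.length ∨ inputs.length ≤ 1

instance (inputs : List (List Int)) (results : List (List Int)) (k : Int) : Decidable (Pre_is_Lipschitz inputs results k) := by unfold Pre_is_Lipschitz; infer_instance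

def pvWitness_is_Lipschitz : List (List Int) × List (List Int) × Int := ([[1], [0]], [[1], [0]], 1)

def Spec_is_Lipschitz (inputs : List (List Int)) (results : List (List Int)) (k : Int) (out : Bool) : Prop := out = is_Lipschitz_alt inputs results k
instance (inputs : List (List Int)) (results : List (List Int)) (k : Int) (out : Bool) : Decidable (Spec_is_Lipschitz inputs results k out) := by unfold Spec_is_Lipschitz; infer_instance

-- ===== CLAIM (what is proved, stated in full; the proofs are below) =====
def Claim_equal_is_Lipschitz : Prop := ∀ (inputs : List (List Int)) (results : List (List Int)) (k : Int), Dom_is_Lipschitz inputs results k → Pre_is_Lipschitz inputs results k → Spec_is_Lipschitz inputs results k (is_Lipschitz inputs results k)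

-- ===== LEMMAS AND PROOFS =====

-- common reference form of the binary-to-decimal value
def decR : List Int → Int
  | [] => 0
  | a :: t => a * 2 ^ t.length + decR t

-- the Lipschitz relation on (input-decimal, result-decimal) points
def lipR (k : Int) (p q : Int × Int) : Prop := |q.2 - p.2| ≤ k * |q.1 - p.1|

lemma foldl_step (t : List Int) (s : Int) (j : Nat) :
    (t.foldl (fun (p : Int × Nat) i => (p.1 + i * 2 ^ p.2, p.2 - 1)) (s, t.length - 1 + j)).1
      = s + 2 ^ j * decR t := by
  induction t generalizing s j with
  | nil => simp [decR]
  | cons a t ih =>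
    cases t with
    | nil => simp [decR]; ring
    | cons b t' =>
      have h1 : (a :: b :: t').length - 1 + j = (b :: t').length + j := by simp
      rw [h1]
      have h2 : ((b :: t').foldl (fun (p : Int × Nat) i => (p.1 + i * 2 ^ p.2, p.2 - 1))
          (s + a * 2 ^ ((b :: t').length + j), (b :: t').length + j - 1)).1
          = s + a * 2 ^ ((b :: t').length + j) + 2 ^ j * decR (b :: t') := by
        have h3 : (b :: t').length + j - 1 = (b :: t').length - 1 + j := by
          simp only [List.length_cons]; omega
        rw [h3]; exact ih _ j
      rw [List.foldl_cons, h2]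
      simp [decR, pow_add]
      ring

lemma to_decimal_eq (lst : List Int) : to_decimal lst = decR lst := by
  have := foldl_step lst 0 0
  simpa [to_decimal] using this

lemma horner_eq (bits : List Int) (v : Int) :
    bits.foldl (fun v b => 2 * v + b) v = v * 2 ^ bits.length + decR bits := by
  induction bits generalizing v with
  | nil => simp [decR]
  | cons a t ih =>
    simp only [List.foldl_cons]
    rw [ih]
    simp [decR, pow_succ]
    ring

lemma hornerDec_eq (bits : List Int) : hornerDec bits = decR bits := by
  simpa [hornerDec] using horner_eq bits 0

lemma lipR_symm (k : Int) : Symmetric (lipR k) := by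
  intro p q h
  unfold lipR at *
  rwa [abs_sub_comm p.2 q.2, abs_sub_comm p.1 q.1]

-- telescoping: on a list sorted by first component, the adjacent-pairs condition
-- already implies the all-pairs condition
lemma chain_to_pairwise (k : Int) (l : List (Int × Int))
    (hs : l.Pairwise (fun p q => p.1 ≤ q.1)) (hc : l.IsChain (lipR k)) :
    l.Pairwise (lipR k) := by
  induction l with
  | nil => exact List.Pairwise.nil
  | cons a t ih =>
    rw [List.pairwise_cons] at hs
    rw [List.isChain_cons] at hc
    have ht : t.Pairwise (lipR k) := ih hs.2 hc.2
    refine List.pairwise_cons.mpr ⟨?_, ht⟩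
    intro c hcmem
    cases t with
    | nil => simp at hcmem
    | cons b t' =>
      have hab : lipR k a b := hc.1 b rfl
      rcases List.mem_cons.mp hcmem with h | h
      · exact h ▸ hab
      · have hbc : lipR k b c := List.rel_of_pairwise_cons ht h
        have h1 : a.1 ≤ b.1 := hs.1 b (by simp)
        have h2 : b.1 ≤ c.1 := (List.pairwise_cons.mp hs.2).1 c h
        unfold lipR at *
        have htri : |c.2 - a.2| ≤ |c.2 - b.2| + |b.2 - a.2| := abs_sub_le _ _ _
        rw [abs_of_nonneg (by omega : (0:Int) ≤ b.1 - a.1)] at hab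
        rw [abs_of_nonneg (by omega : (0:Int) ≤ c.1 - b.1)] at hbc
        rw [abs_of_nonneg (by omega : (0:Int) ≤ c.1 - a.1)]
        have hk : k * (c.1 - b.1) + k * (b.1 - a.1) = k * (c.1 - a.1) := by ring
        linarith

lemma zip_tail_all (g : (Int × Int) × (Int × Int) → Bool) (l : List (Int × Int)) :
    ((l.zip (l.drop 1)).all g = true) ↔ l.IsChain (fun p q => g (p, q) = true) := by
  induction l with
  | nil => simp
  | cons a t ih =>
    cases t with
    | nil => simp
    | cons b t' =>
      rw [List.drop_one, List.tail_cons, List.zip_cons_cons, List.all_cons,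
        List.isChain_cons, Bool.and_eq_true]
      rw [← ih]
      simp

lemma mem_combs2_pyRange (n : Nat) : ∀ (a b i j : Int), b = a + n →
    ((i, j) ∈ combs2 (PySem.List.pyRange a b 1) ↔ a ≤ i ∧ i < j ∧ j < b) := by
  induction n with
  | zero =>
    intro a b i j hb
    rw [show b = a by omega, PySem.List.pyRange_one_eq_nil (le_refl a)]
    simp [combs2]; omega
  | succ m ih =>
    intro a b i j hb
    have hab : a < b := by omega
    rw [PySem.List.pyRange_one_cons hab]
    simp only [combs2, List.mem_append, List.mem_map]
    rw [ih (a + 1) b i j (by omega)]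
    constructor
    · rintro (⟨x, hx, he⟩ | h)
      · have := PySem.List.mem_pyRange_one.mp hx
        cases he; omega
      · omega
    · intro h
      by_cases hia : i = a
      · left; exact ⟨j, PySem.List.mem_pyRange_one.mpr (by omega), by rw [hia]⟩
      · right; omega

lemma lipLoop_iff (inputs results : List (List Int)) (k : Int) (pl : List (Int × Int)) :
    lipLoop inputs results k pl = true ↔
      ∀ p ∈ pl, |to_decimal (PySem.List.pyGetD results p.1 []) - to_decimal (PySem.List.pyGetD results p.2 [])|
        ≤ k * |to_decimal (PySem.List.pyGetD inputs p.1 []) - to_decimal (PySem.List.pyGetD inputs p.2 [])| := by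
  induction pl with
  | nil => simp [lipLoop]
  | cons p rest ih =>
    obtain ⟨i, j⟩ := p
    simp only [lipLoop, List.mem_cons]
    split_ifs with h
    · simp only [false_iff]
      intro hall
      exact absurd (hall (i, j) (Or.inl rfl)) (by simpa using h)
    · rw [ih]
      constructor
      · rintro hall q (rfl | hq)
        · simpa using not_lt.mp h
        · exact hall q hq
      · intro hall q hq
        exact hall q (Or.inr hq)

-- ===== VERDICT (by name: the statement is the Claim_ definition above) =====
theorem is_Lipschitz_spec : Claim_equal_is_Lipschitz := by
  intro inputs results k _ hpre
  unfold Spec_is_Lipschitz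
  have hmapeq : (inputs.zip results).map (fun p => (hornerDec p.1, hornerDec p.2))
      = (inputs.zip results).map (fun p => (decR p.1, decR p.2)) := by
    apply List.map_congr_left
    intro p _
    simp [hornerDec_eq]
  have hB : (is_Lipschitz_alt inputs results k = true) ↔
      ((inputs.zip results).map (fun p => (decR p.1, decR p.2))).Pairwise (lipR k) := by
    have hBdef : is_Lipschitz_alt inputs results k =
        (let pts := PySem.List.sorted ((inputs.zip results).map (fun p => (decR p.1, decR p.2)))
            (fun p => p.1) false
         (pts.zip (pts.drop 1)).all (fun pq => decide (|pq.2.2 - pq.1.2| ≤ k * |pq.2.1 - pq.1.1|))) := by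
      simp only [is_Lipschitz_alt]
      rw [hmapeq]
    rw [hBdef]
    simp only []
    rw [zip_tail_all]
    have hrel : ∀ p q : Int × Int,
        ((fun pq : (Int × Int) × (Int × Int) => decide (|pq.2.2 - pq.1.2| ≤ k * |pq.2.1 - pq.1.1|)) (p, q) = true)
          ↔ lipR k p q := by
      intro p q; simp [lipR]
    rw [List.IsChain.iff hrel]
    rw [← List.Perm.pairwise_iff (fun h => lipR_symm k h)
        (PySem.List.sorted_perm ((inputs.zip results).map (fun p : List Int × List Int => (decR p.1, decR p.2)))
          (fun p : Int × Int => p.1) false)]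
    constructor
    · intro hchain
      exact chain_to_pairwise k _ (PySem.List.sorted_pairwise _ _) hchain
    · intro hpair
      exact hpair.isChain
  have hA : (is_Lipschitz inputs results k = true) ↔
      (∀ p ∈ combs2 (PySem.List.pyRange 0 (inputs.length : Int) 1),
        |decR (PySem.List.pyGetD results p.1 []) - decR (PySem.List.pyGetD results p.2 [])|
          ≤ k * |decR (PySem.List.pyGetD inputs p.1 []) - decR (PySem.List.pyGetD inputs p.2 [])|) := by
    simp only [is_Lipschitz]
    rw [lipLoop_iff]
    simp only [to_decimal_eq]
  by_cases hn : inputs.length ≤ 1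
  · -- fewer than two points: no pair to check on either side
    have hBtrue : ((inputs.zip results).map (fun p => (decR p.1, decR p.2))).Pairwise (lipR k) := by
      have hlen : ((inputs.zip results).map (fun p => (decR p.1, decR p.2))).length ≤ 1 := by
        simp [List.length_zip]; omega
      cases hLc : (inputs.zip results).map (fun p => (decR p.1, decR p.2)) with
      | nil => exact List.Pairwise.nil
      | cons x t =>
        cases t with
        | nil => exact List.pairwise_singleton _ _
        | cons y t' => rw [hLc] at hlen; simp at hlen
    have hAtrue : is_Lipschitz inputs results k = true := by
      rw [hA]
      intro p hp
      obtain ⟨i, j⟩ := p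
      have := (mem_combs2_pyRange inputs.length 0 (inputs.length : Int) i j (by simp)).mp hp
      omega
    rw [hAtrue]
    exact (hB.mpr hBtrue).symm
  · have hlen : inputs.length ≤ results.length := by
      rcases hpre with h | h
      · exact h
      · omega
    have hLlen : ((inputs.zip results).map (fun p => (decR p.1, decR p.2))).length = inputs.length := by
      simp [List.length_zip]; omega
    have key : (∀ p ∈ combs2 (PySem.List.pyRange 0 (inputs.length : Int) 1),
        |decR (PySem.List.pyGetD results p.1 []) - decR (PySem.List.pyGetD results p.2 [])|
          ≤ k * |decR (PySem.List.pyGetD inputs p.1 []) - decR (PySem.List.pyGetD inputs p.2 [])|) ↔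
        ((inputs.zip results).map (fun p => (decR p.1, decR p.2))).Pairwise (lipR k) := by
      rw [List.pairwise_iff_getElem]
      constructor
      · intro hall a b ha hb hab
        rw [hLlen] at ha hb
        have hmem : ((a : Int), (b : Int)) ∈ combs2 (PySem.List.pyRange 0 (inputs.length : Int) 1) :=
          (mem_combs2_pyRange inputs.length 0 (inputs.length : Int) a b (by simp)).mpr
            ⟨Int.natCast_nonneg a, by exact_mod_cast hab, by exact_mod_cast hb⟩
        have hcond := hall ((a : Int), (b : Int)) hmem
        simp only [PySem.List.pyGetD_natCast] at hcond
        rw [List.getD_eq_getElem _ _ (by omega : a < results.length),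
          List.getD_eq_getElem _ _ (by omega : b < results.length),
          List.getD_eq_getElem _ _ (by omega : a < inputs.length),
          List.getD_eq_getElem _ _ (by omega : b < inputs.length)] at hcond
        simp only [List.getElem_map, List.getElem_zip, lipR]
        simpa [abs_sub_comm] using hcond
      · intro hp p hpmem
        obtain ⟨i, j⟩ := p
        have hbd := (mem_combs2_pyRange inputs.length 0 (inputs.length : Int) i j (by simp)).mp hpmem
        have hi : i = ((i.toNat : Nat) : Int) := by omega
        have hj : j = ((j.toNat : Nat) : Int) := by omega
        rw [hi, hj]
        simp only [PySem.List.pyGetD_natCast]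
        have ha : i.toNat < ((inputs.zip results).map (fun p => (decR p.1, decR p.2))).length := by omega
        have hb : j.toNat < ((inputs.zip results).map (fun p => (decR p.1, decR p.2))).length := by omega
        have hthis := hp i.toNat j.toNat ha hb (by omega)
        simp only [List.getElem_map, List.getElem_zip, lipR] at hthis
        rw [List.getD_eq_getElem _ _ (by omega : i.toNat < results.length),
          List.getD_eq_getElem _ _ (by omega : j.toNat < results.length),
          List.getD_eq_getElem _ _ (by omega : i.toNat < inputs.length),
          List.getD_eq_getElem _ _ (by omega : j.toNat < inputs.length)]
        simpa [abs_sub_comm] using hthis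
    have hiff : (is_Lipschitz inputs results k = true) ↔ (is_Lipschitz_alt inputs results k = true) := by
      rw [hA, key, hB]
    exact Bool.coe_iff_coe.mp hiff
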